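-- pv_equiv track=rewrite | github.com/gawdeganesh/Data-Engineering | DSA/Code_Debug/Week4_list.py | find_all_consecutive_common_numbers
-- ===== SOURCE A (Python) =====
-- def find_all_consecutive_common_numbers(lst):
--     # Early return if the list has fewer than 3 elements
--     if len(lst) < 3:
--         return []
--
--     results = []  # To store all sets of three consecutive common numbers
--     current_count = 1  # To count the occurrences of the current number
--
--     for i in range(1, len(lst)):
--         if lst[i] == lst[i-1]:
--             current_count += 1
--             # Check if the count is 3 and the number is not already added
--             if current_count == 3:
--                 if results and results[-1] != lst[i]:
--                     results.append(lst[i])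
--                 elif not results:
--                     results.append(lst[i])
--         else:
--             current_count = 1  # Reset count for a new number
--
--     return results
-- ===== SOURCE B (Python) =====
-- def find_all_consecutive_common_numbers(lst):
--     # Run-based scan: split lst into maximal runs of equal values, record
--     # each run of length >= 3, deduplicating only against the last result.
--     results = []
--     i = 0
--     n = len(lst)
--     while i < n:
--         j = i
--         while j < n and lst[j] == lst[i]:
--             j += 1
--         if j - i >= 3 and (not results or results[-1] != lst[i]):
--             results.append(lst[i])
--         i = j
--     return results
-- ===== Notes on version B (the rewrite author's own statement) =====
-- stated objective: simpler
-- what changed: Replaces A's per-element counter state machine (with its count==3 trigger and len<3 early return) by a two-pointer scan over maximal runs of equal values, recording each run of length >= 3 with the same dedup-against-last rule.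
import Mathlib
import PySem

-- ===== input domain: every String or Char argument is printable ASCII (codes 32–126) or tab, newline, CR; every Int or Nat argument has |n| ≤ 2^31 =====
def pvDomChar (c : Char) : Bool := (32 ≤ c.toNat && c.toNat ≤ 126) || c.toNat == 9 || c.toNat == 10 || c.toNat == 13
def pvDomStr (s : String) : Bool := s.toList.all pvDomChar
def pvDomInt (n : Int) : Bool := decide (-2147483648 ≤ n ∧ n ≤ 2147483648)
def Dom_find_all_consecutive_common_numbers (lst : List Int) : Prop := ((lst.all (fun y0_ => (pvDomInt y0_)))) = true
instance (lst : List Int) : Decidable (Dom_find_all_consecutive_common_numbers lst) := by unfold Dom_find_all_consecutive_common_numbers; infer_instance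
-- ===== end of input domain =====

-- B replaces A's per-element counter state machine by a two-pointer scan over
-- maximal runs of equal values (objective: simpler).

-- ===== PORT A =====
-- one step of A's for-loop body: state is (results, current_count), i the index
def pvStepA (lst : List Int) (st : List Int × Int) (i : Int) : List Int × Int :=
  let results := st.1
  let current_count := st.2
  if PySem.List.pyGetD lst i 0 = PySem.List.pyGetD lst (i - 1) 0 then
    let current_count := current_count + 1
    let results :=
      if current_count = 3 then
        if results ≠ [] ∧ results.getLast? ≠ some (PySem.List.pyGetD lst i 0) then
          results ++ [PySem.List.pyGetD lst i 0]
        else if results = [] then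
          results ++ [PySem.List.pyGetD lst i 0]
        else results
      else results
    (results, current_count)
  else (results, 1)

def find_all_consecutive_common_numbers (lst : List Int) : List Int :=
  if lst.length < 3 then []
  else
    ((PySem.List.pyRange 1 lst.length 1).foldl (pvStepA lst) ([], 1)).1

-- ===== PORT B =====
-- inner while: length of the leading run of v, and the remainder of the list
def pvTakeRun (v : Int) : List Int → Nat × List Int
  | [] => (0, [])
  | x :: xs =>
    if x = v then
      let r := pvTakeRun v xs
      (r.1 + 1, r.2)
    else (0, x :: xs)

theorem pvTakeRun_rest_le (v : Int) (xs : List Int) : (pvTakeRun v xs).2.length ≤ xs.length := by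
  induction xs with
  | nil => simp [pvTakeRun]
  | cons x xs ih =>
    simp only [pvTakeRun]
    split
    · simpa using Nat.le_succ_of_le ih
    · simp

-- outer while loop of B
def pvLoopB (results : List Int) : List Int → List Int
  | [] => results
  | x :: xs =>
    let r := pvTakeRun x xs
    let results :=
      if r.1 + 1 ≥ 3 ∧ (results = [] ∨ results.getLast? ≠ some x) then results ++ [x]
      else results
    pvLoopB results r.2
termination_by xs => xs.length
decreasing_by
  exact Nat.lt_succ_of_le (pvTakeRun_rest_le x xs)

def find_all_consecutive_common_numbers_alt (lst : List Int) : List Int :=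
  pvLoopB [] lst

-- ===== PRECONDITION & SPEC =====
def Spec_find_all_consecutive_common_numbers (lst : List Int) (out : List Int) : Prop := out = find_all_consecutive_common_numbers_alt lst
instance (lst : List Int) (out : List Int) : Decidable (Spec_find_all_consecutive_common_numbers lst out) := by unfold Spec_find_all_consecutive_common_numbers; infer_instance

-- ===== CLAIM (what is proved, stated in full; the proofs are below) =====
def Claim_equal_find_all_consecutive_common_numbers : Prop := ∀ (lst : List Int), Dom_find_all_consecutive_common_numbers lst → Spec_find_all_consecutive_common_numbers lst (find_all_consecutive_common_numbers lst)

-- ===== LEMMAS AND PROOFS =====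

-- A's loop as a structural recursion over the tail of the list
def pvLoopA (prev : Int) (count : Int) (results : List Int) : List Int → List Int
  | [] => results
  | x :: xs =>
    if x = prev then
      let c := count + 1
      let r :=
        if c = 3 then
          if results ≠ [] ∧ results.getLast? ≠ some x then results ++ [x]
          else if results = [] then results ++ [x]
          else results
        else results
      pvLoopA x c r xs
    else pvLoopA x 1 results xs

theorem pvTakeRun_fst_le (v : Int) (xs : List Int) : (pvTakeRun v xs).1 ≤ xs.length := by
  induction xs with
  | nil => simp [pvTakeRun]
  | cons x xs ih =>
    simp only [pvTakeRun]
    split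
    · simpa using ih
    · simp

theorem pvFold_eq_loopA (lst : List Int) : ∀ (k : Nat) (j : Nat) (results : List Int) (c : Int),
    1 ≤ j → lst.length - j ≤ k →
    ((PySem.List.pyRange (j : Int) (lst.length : Int) 1).foldl (pvStepA lst) (results, c)).1
      = pvLoopA (lst.getD (j - 1) 0) c results (lst.drop j) := by
  intro k
  induction k with
  | zero =>
    intro j results c hj hk
    have hle : lst.length ≤ j := by omega
    rw [PySem.List.pyRange_one_eq_nil (by exact_mod_cast hle), List.drop_eq_nil_of_le hle]
    simp [pvLoopA]
  | succ k ih =>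
    intro j results c hj hk
    by_cases hlt : j < lst.length
    · rw [PySem.List.pyRange_one_cons (by exact_mod_cast hlt), List.foldl_cons]
      have hcast : (j : Int) + 1 = ((j + 1 : Nat) : Int) := by push_cast; ring
      rw [hcast]
      rw [show pvStepA lst (results, c) (j : Int)
            = ((pvStepA lst (results, c) (j : Int)).1, (pvStepA lst (results, c) (j : Int)).2) from rfl]
      rw [ih (j + 1) _ _ (by omega) (by omega)]
      rw [List.drop_eq_getElem_cons hlt,
          show lst[j] = lst.getD j 0 from (List.getD_eq_getElem lst 0 hlt).symm]
      have hj1 : (j : Int) - 1 = ((j - 1 : Nat) : Int) := by omega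
      have hgd : (j + 1) - 1 = j := by omega
      simp only [pvStepA, hj1, PySem.List.pyGetD_natCast, hgd]
      conv_rhs => rw [pvLoopA]
      by_cases h : lst.getD j 0 = lst.getD (j - 1) 0
      · rw [if_pos h, if_pos h]
      · rw [if_neg h, if_neg h]
    · have hle : lst.length ≤ j := by omega
      rw [PySem.List.pyRange_one_eq_nil (by exact_mod_cast hle), List.drop_eq_nil_of_le hle]
      simp [pvLoopA]

theorem pvMain (xs : List Int) : ∀ (v : Int) (c : Int) (results : List Int),
    1 ≤ c → (3 ≤ c → results.getLast? = some v) →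
    pvLoopA v c results xs =
      pvLoopB (if (c + (pvTakeRun v xs).1 ≥ 3 ∧ c < 3 ∧ (results = [] ∨ results.getLast? ≠ some v))
               then results ++ [v] else results) (pvTakeRun v xs).2 := by
  induction xs with
  | nil =>
    intro v c results hc hinv
    rw [show pvTakeRun v [] = (0, []) from rfl]
    rw [if_neg (fun h => by obtain ⟨h1, h2, -⟩ := h; push_cast at h1; omega)]
    simp [pvLoopA, pvLoopB]
  | cons x xs ih =>
    intro v c results hc hinv
    by_cases hx : x = v
    · subst hx
      rw [pvLoopA, if_pos rfl]
      have htr1 : (pvTakeRun x (x :: xs)).1 = (pvTakeRun x xs).1 + 1 := by simp [pvTakeRun]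
      have htr2 : (pvTakeRun x (x :: xs)).2 = (pvTakeRun x xs).2 := by simp [pvTakeRun]
      rw [htr1, htr2]
      show pvLoopA x (c + 1)
          (if c + 1 = 3 then
            (if results ≠ [] ∧ results.getLast? ≠ some x then results ++ [x]
             else if results = [] then results ++ [x] else results)
           else results) xs = _
      rw [ih x (c + 1) _ (by omega) ?hinv']
      case hinv' =>
        intro _
        by_cases hc3 : c + 1 = 3
        · rw [if_pos hc3]
          by_cases he : results = []
          · simp [he]
          · by_cases hl : results.getLast? = some x
            · rw [if_neg (by simp [hl]), if_neg he]; exact hl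
            · rw [if_pos ⟨he, hl⟩]; simp
        · rw [if_neg hc3]; exact hinv (by omega)
      congr 1
      by_cases hc3 : c + 1 = 3
      · rw [if_pos hc3]
        rw [if_neg (fun h => absurd h.2.1 (by omega))]
        by_cases he : results = []
        · rw [if_neg (by simp [he]), if_pos he,
              if_pos ⟨by push_cast; omega, by omega, Or.inl he⟩]
        · by_cases hl : results.getLast? = some x
          · rw [if_neg (by simp [hl]), if_neg he,
                if_neg (fun h => by rcases h.2.2 with h' | h'; exact he h'; exact h' hl)]
          · rw [if_pos ⟨he, hl⟩, if_pos ⟨by push_cast; omega, by omega, Or.inr hl⟩]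
      · by_cases hcge : 3 ≤ c
        · rw [if_neg hc3, if_neg (fun h => absurd h.2.1 (by omega)),
              if_neg (fun h => absurd h.2.1 (by omega))]
        · have hc1 : c = 1 := by omega
          rw [if_neg hc3]
          by_cases hp : (1 : Int) ≤ ((pvTakeRun x xs).1 : Int) ∧ (results = [] ∨ results.getLast? ≠ some x)
          · obtain ⟨hK1, hP⟩ := hp
            rw [if_pos ⟨by omega, by omega, hP⟩,
                if_pos ⟨by push_cast; omega, by omega, hP⟩]
          · rw [if_neg (fun h => hp ⟨by have h1 := h.1; push_cast at h1; omega, h.2.2⟩),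
                if_neg (fun h => hp ⟨by have h1 := h.1; push_cast at h1; omega, h.2.2⟩)]
    · rw [pvLoopA, if_neg hx]
      have ht1 : (pvTakeRun v (x :: xs)).1 = 0 := by simp [pvTakeRun, hx]
      have ht2 : (pvTakeRun v (x :: xs)).2 = x :: xs := by simp [pvTakeRun, hx]
      rw [ht1, ht2]
      rw [if_neg (fun h => by obtain ⟨h1, h2, -⟩ := h; push_cast at h1; omega)]
      conv_rhs => rw [pvLoopB]
      rw [ih x 1 results (by norm_num) (fun h => absurd h (by omega))]
      show _ = pvLoopB
        (if (pvTakeRun x xs).1 + 1 ≥ 3 ∧ (results = [] ∨ results.getLast? ≠ some x)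
         then results ++ [x] else results) (pvTakeRun x xs).2
      congr 1
      by_cases hp : 2 ≤ (pvTakeRun x xs).1 ∧ (results = [] ∨ results.getLast? ≠ some x)
      · obtain ⟨h1, h2⟩ := hp
        rw [if_pos ⟨by omega, by omega, h2⟩, if_pos ⟨by omega, h2⟩]
      · rw [if_neg (fun h => hp ⟨by have h1 := h.1; push_cast at h1; omega, h.2.2⟩),
            if_neg (fun h => hp ⟨by have h1 := h.1; omega, h.2⟩)]

theorem pvLoopB_short : ∀ (n : Nat) (xs : List Int) (results : List Int), xs.length ≤ n → xs.length < 3 → pvLoopB results xs = results := by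
  intro n
  induction n with
  | zero =>
    intro xs results h1 _
    match xs with
    | [] => simp [pvLoopB]
  | succ n ih =>
    intro xs results h1 h2
    match xs with
    | [] => simp [pvLoopB]
    | x :: xs' =>
      rw [pvLoopB]
      have hfst := pvTakeRun_fst_le x xs'
      have hrest := pvTakeRun_rest_le x xs'
      rw [if_neg (by simp at h2 ⊢; omega)]
      exact ih _ _ (by simp at h1; omega) (by simp at h2; omega)

-- ===== VERDICT (by name: the statement is the Claim_ definition above) =====
theorem find_all_consecutive_common_numbers_spec : Claim_equal_find_all_consecutive_common_numbers := by
  intro lst _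
  unfold Spec_find_all_consecutive_common_numbers find_all_consecutive_common_numbers find_all_consecutive_common_numbers_alt
  by_cases hlen : lst.length < 3
  · rw [if_pos hlen, pvLoopB_short lst.length lst [] le_rfl hlen]
  · rw [if_neg hlen]
    have hfold := pvFold_eq_loopA lst lst.length 1 [] 1 le_rfl (by omega)
    push_cast at hfold
    rw [hfold]
    rcases lst with _ | ⟨x, xs⟩
    · simp at hlen
    · show pvLoopA x 1 [] xs = pvLoopB [] (x :: xs)
      rw [pvMain xs x 1 [] le_rfl (fun h => absurd h (by omega))]
      conv_rhs => rw [pvLoopB]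
      show _ = pvLoopB
        (if (pvTakeRun x xs).1 + 1 ≥ 3 ∧ (([] : List Int) = [] ∨ ([] : List Int).getLast? ≠ some x)
         then ([] : List Int) ++ [x] else []) (pvTakeRun x xs).2
      congr 1
      by_cases hp : 2 ≤ (pvTakeRun x xs).1
      · rw [if_pos ⟨by omega, by omega, Or.inl rfl⟩, if_pos ⟨by omega, Or.inl rfl⟩]
      · rw [if_neg (fun h => hp (by have h1 := h.1; push_cast at h1; omega)),
            if_neg (fun h => hp (by have h1 := h.1; omega))]
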